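-- pv_equiv track=rewrite | github.com/blossom22/11_Inflearn_Algorithm | 3_hash_2.py | solution
-- ===== SOURCE A (Python) =====
-- from collections import defaultdict
--
-- def solution(nums):
--     answer = -1
--     n = defaultdict(int)    # defaultdict를 사용하며, value값은 int라고 지정
--     # defaultdict는 따로 엔트리 안넣었어도, 찾는 key값의 디폴트를 0으로 지정한다.
--     for i in nums:
--         n[i] += 1
--     for key in n:
--         if n[key]==1:
--             answer = max(answer, key)
--     return answer
-- ===== SOURCE B (Python) =====
-- def solution(nums):
--     ans = -1
--     prev = None
--     count = 0
--     for x in sorted(nums):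
--         if x == prev:
--             count += 1
--         else:
--             if count == 1:
--                 ans = max(ans, prev)
--             prev = x
--             count = 1
--     if count == 1:
--         ans = max(ans, prev)
--     return ans
-- ===== Notes on version B (the rewrite author's own statement) =====
-- stated objective: faster
-- what changed: Replaces the frequency dictionary with a sort followed by a single run-length scan of the sorted list: an element is unique iff its run has length 1, and the maximum such element (floored at -1) is tracked on the fly.
import Mathlib
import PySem

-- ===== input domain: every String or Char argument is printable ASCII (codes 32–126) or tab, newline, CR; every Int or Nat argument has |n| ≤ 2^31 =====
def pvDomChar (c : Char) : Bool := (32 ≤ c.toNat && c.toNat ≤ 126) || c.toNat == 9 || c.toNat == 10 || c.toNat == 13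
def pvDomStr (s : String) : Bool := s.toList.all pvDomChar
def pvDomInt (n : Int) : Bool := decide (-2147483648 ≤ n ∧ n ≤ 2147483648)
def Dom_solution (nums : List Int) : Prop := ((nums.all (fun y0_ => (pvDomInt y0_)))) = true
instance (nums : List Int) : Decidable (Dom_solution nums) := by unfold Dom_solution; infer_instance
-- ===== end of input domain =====

-- B replaces A's frequency dictionary by a sort plus one run-length scan of the
-- sorted list (an element is unique iff its run has length 1); same result, no dict.

-- ===== PORT A =====
def solution (nums : List Int) : Int :=
  let n := nums.foldl (fun d i => d.modify i 0 (· + 1)) (PySem.Dict.empty : PySem.Dict Int Int)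
  n.keys.foldl (fun answer key => if n.getD key 0 = 1 then max answer key else answer) (-1)

-- ===== PORT B =====
-- one step of B's loop over the sorted list; state = (ans, prev, count)
def solAltStep (st : Int × Option Int × Int) (x : Int) : Int × Option Int × Int :=
  match st with
  | (ans, prev, count) =>
    if prev = some x then (ans, prev, count + 1)
    else
      match prev with
      | some p => ((if count = 1 then max ans p else ans), some x, 1)
      | none => (ans, some x, 1)   -- count = 1 with prev = None is unreachable in Source B

def solution_alt (nums : List Int) : Int :=
  let st := (PySem.List.sorted nums (fun x => x) false).foldl solAltStep (-1, none, 0)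
  match st with
  | (ans, some p, count) => if count = 1 then max ans p else ans
  | (ans, none, _) => ans   -- count = 1 with prev = None is unreachable in Source B

-- ===== PRECONDITION & SPEC =====
def Spec_solution (nums : List Int) (out : Int) : Prop := out = solution_alt nums
instance (nums : List Int) (out : Int) : Decidable (Spec_solution nums out) := by unfold Spec_solution; infer_instance

-- ===== CLAIM (what is proved, stated in full; the proofs are below) =====
def Claim_equal_solution : Prop := ∀ (nums : List Int), Dom_solution nums → Spec_solution nums (solution nums)

-- ===== LEMMAS AND PROOFS =====

-- the list of values occurring exactly once in l (first-occurrence order)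
def pvUniq (l : List Int) : List Int :=
  (PySem.List.dedup l).filter (fun v => decide (l.count v = 1))

theorem mem_pvUniq (l : List Int) (v : Int) :
    v ∈ pvUniq l ↔ v ∈ l ∧ l.count v = 1 := by
  simp [pvUniq]

theorem pvUniq_mem_of_perm {l₁ l₂ : List Int} (h : l₁.Perm l₂) (v : Int) :
    v ∈ pvUniq l₁ ↔ v ∈ pvUniq l₂ := by
  rw [mem_pvUniq, mem_pvUniq, h.mem_iff, h.count_eq]

theorem le_foldl_max_of_mem {l : List Int} {x : Int} (a : Int) (h : x ∈ l) :
    x ≤ l.foldl max a :=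
  (PySem.List.le_foldl_max l a).2 x h

-- foldl max depends only on the set of elements
theorem foldl_max_eq_of_mem_iff (l₁ l₂ : List Int) (a : Int)
    (h : ∀ x, x ∈ l₁ ↔ x ∈ l₂) : l₁.foldl max a = l₂.foldl max a := by
  apply le_antisymm
  · rcases PySem.List.foldl_max_mem l₁ a with h1 | h1
    · rw [h1]; exact (PySem.List.le_foldl_max l₂ a).1
    · exact le_foldl_max_of_mem a ((h _).1 h1)
  · rcases PySem.List.foldl_max_mem l₂ a with h1 | h1
    · rw [h1]; exact (PySem.List.le_foldl_max l₁ a).1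
    · exact le_foldl_max_of_mem a ((h _).2 h1)

-- the finalisation after B's loop
def pvFin : Int × Option Int × Int → Int
  | (ans, some p, count) => if count = 1 then max ans p else ans
  | (ans, none, _) => ans

-- core invariant of B's run-length scan on a sorted tail
theorem run_invariant (t : List Int) (hs : t.Pairwise (· ≤ ·)) :
    ∀ (p ans : Int) (n : Nat), 1 ≤ n → (∀ x ∈ t, p ≤ x) →
    pvFin (t.foldl solAltStep (ans, some p, (n : Int)))
      = (pvUniq (List.replicate n p ++ t)).foldl max ans := by
  induction t with
  | nil =>
    intro p ans n hn _
    have hmem : ∀ v, v ∈ pvUniq (List.replicate n p ++ ([] : List Int)) ↔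
        v ∈ (if n = 1 then [p] else ([] : List Int)) := by
      intro v
      rw [mem_pvUniq]
      simp only [List.append_nil, List.mem_replicate, List.count_replicate]
      split_ifs with h1 <;> (simp_all; try omega)
    rw [List.foldl_nil, foldl_max_eq_of_mem_iff _ _ ans hmem]
    by_cases h1 : n = 1
    · subst h1; simp [pvFin]
    · have h2 : ((n : Int)) ≠ 1 := by exact_mod_cast h1
      simp [pvFin, h1, h2]
  | cons x t ih =>
    intro p ans n hn hp
    have hxt : ∀ y ∈ t, x ≤ y := fun y hy => (List.pairwise_cons.1 hs).1 y hy
    have hst : t.Pairwise (· ≤ ·) := (List.pairwise_cons.1 hs).2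
    by_cases hpx : p = x
    · subst hpx
      have hstep : solAltStep (ans, some p, (n : Int)) p = (ans, some p, (n : Int) + 1) := by
        simp [solAltStep]
      have hcast : ((n : Int) + 1) = ((n + 1 : Nat) : Int) := by push_cast; ring
      rw [List.foldl_cons, hstep, hcast,
        ih hst p ans (n + 1) (by omega) (fun y hy => hp y (List.mem_cons_of_mem _ hy))]
      have hperm2 : (List.replicate n p ++ p :: t).Perm (List.replicate (n + 1) p ++ t) := by
        have hrw : List.replicate (n + 1) p ++ t = p :: (List.replicate n p ++ t) := by
          simp [List.replicate_succ]
        rw [hrw]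
        exact List.perm_middle
      exact foldl_max_eq_of_mem_iff _ _ ans (pvUniq_mem_of_perm hperm2.symm)
    · -- p < x, so p does not occur in x :: t
      have hplt : p < x := lt_of_le_of_ne (hp x (List.mem_cons_self)) hpx
      have hpnot : p ∉ x :: t := by
        intro hmem
        rcases List.mem_cons.1 hmem with h | h
        · exact hpx h
        · have := hxt p h; omega
      have hcnt : (x :: t).count p = 0 := List.count_eq_zero.2 hpnot
      have hstep : solAltStep (ans, some p, (n : Int)) x
          = ((if (n : Int) = 1 then max ans p else ans), some x, 1) := by
        simp [solAltStep, hpx]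
      have hrun := ih hst x (if (n : Int) = 1 then max ans p else ans) 1 (le_refl 1) hxt
      simp only [Nat.cast_one] at hrun
      rw [List.foldl_cons, hstep, hrun]
      have hrepl : List.replicate 1 x ++ t = x :: t := by simp
      rw [hrepl]
      by_cases hn1 : n = 1
      · subst hn1
        have hmem : ∀ v, v ∈ pvUniq (List.replicate 1 p ++ x :: t) ↔
            v ∈ p :: pvUniq (x :: t) := by
          intro v
          have hl : List.replicate 1 p ++ x :: t = p :: x :: t := by simp
          rw [hl, List.mem_cons, mem_pvUniq, mem_pvUniq]
          by_cases hvp : v = p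
          · subst hvp
            constructor
            · intro _; exact Or.inl rfl
            · intro _
              refine ⟨by simp, ?_⟩
              simp [hcnt]
          · have hne : ¬ p = v := fun h => hvp h.symm
            constructor
            · rintro ⟨h1, h2⟩
              rcases List.mem_cons.1 h1 with h | h
              · exact absurd h hvp
              · refine Or.inr ⟨h, ?_⟩
                simpa [List.count_cons, hne] using h2
            · rintro (h | ⟨h1, h2⟩)
              · exact absurd h hvp
              · exact ⟨List.mem_cons_of_mem _ h1, by simp [hne, h2]⟩
        rw [foldl_max_eq_of_mem_iff _ _ ans hmem]
        simp
      · have hmem : ∀ v, v ∈ pvUniq (List.replicate n p ++ x :: t) ↔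
            v ∈ pvUniq (x :: t) := by
          intro v
          rw [mem_pvUniq, mem_pvUniq]
          by_cases hvp : v = p
          · subst hvp
            constructor
            · rintro ⟨_, h2⟩
              exfalso
              rw [List.count_append, List.count_replicate, hcnt] at h2
              simp at h2
              omega
            · rintro ⟨h1, _⟩
              exact absurd h1 hpnot
          · have hne : ¬ (p = v) := fun h => hvp h.symm
            rw [List.count_append, List.count_replicate,
              if_neg (show ¬ ((p == v) = true) by simp [hne]), List.mem_append,
              List.mem_replicate]
            constructor
            · rintro ⟨h1, h2⟩
              rcases h1 with h1 | h1
              · exact absurd h1.2 hvp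
              · exact ⟨h1, by omega⟩
            · rintro ⟨h1, h2⟩
              exact ⟨Or.inr h1, by omega⟩
        rw [foldl_max_eq_of_mem_iff _ _ ans hmem]
        have h2 : ¬ ((n : Int) = 1) := by exact_mod_cast hn1
        simp [h2]

-- B's whole scan over a sorted list computes the max of the unique values
theorem scan_sorted (s : List Int) (hs : s.Pairwise (· ≤ ·)) :
    pvFin (s.foldl solAltStep (-1, none, 0)) = (pvUniq s).foldl max (-1) := by
  cases s with
  | nil => simp [pvFin, pvUniq, PySem.List.dedup]
  | cons x t =>
    have hstep : solAltStep (-1, none, 0) x = (-1, some x, 1) := by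
      simp [solAltStep]
    have hrun := run_invariant t (List.pairwise_cons.1 hs).2 x (-1) 1 (le_refl 1)
      (fun y hy => (List.pairwise_cons.1 hs).1 y hy)
    simp only [Nat.cast_one] at hrun
    rw [List.foldl_cons, hstep, hrun]
    apply foldl_max_eq_of_mem_iff
    intro v
    rw [mem_pvUniq, mem_pvUniq]
    simp

-- A's loop is the same max over the unique values (first-occurrence order)
theorem solution_eq_uniq (nums : List Int) :
    solution nums = (pvUniq nums).foldl max (-1) := by
  have h0 : solution nums = (PySem.Dict.counter nums).keys.foldl
      (fun answer key => if (PySem.Dict.counter nums).getD key 0 = 1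
        then max answer key else answer) (-1) := rfl
  rw [h0, PySem.List.foldl_ite_eq_foldl_filter, PySem.Dict.keys_counter,
    ← PySem.List.dedup_eq_ofList]
  have hfilter : (PySem.List.dedup nums).filter
      (fun key => decide ((PySem.Dict.counter nums).getD key 0 = 1))
      = pvUniq nums := by
    unfold pvUniq
    apply List.filter_congr
    intro v _
    rw [PySem.Dict.getD_counter, decide_eq_decide]
    omega
  rw [hfilter]

-- ===== VERDICT (by name: the statement is the Claim_ definition above) =====
theorem solution_spec : Claim_equal_solution := by
  intro nums _
  unfold Spec_solution solution_alt
  have hperm : (PySem.List.sorted nums (fun x => x) false).Perm nums :=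
    PySem.List.sorted_perm nums (fun x => x) false
  have hpair : (PySem.List.sorted nums (fun x => x) false).Pairwise (· ≤ ·) :=
    PySem.List.sorted_pairwise nums (fun x => x)
  have h1 : solution nums
      = (pvUniq (PySem.List.sorted nums (fun x => x) false)).foldl max (-1) := by
    rw [solution_eq_uniq]
    exact foldl_max_eq_of_mem_iff _ _ (-1) (fun v => (pvUniq_mem_of_perm hperm v).symm)
  rw [h1, ← scan_sorted _ hpair]
  rfl
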